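-- pv_equiv track=rewrite | github.com/arthurzengg/coding_q | amazon_us/q1.py | pair_orders_with_ads
-- ===== SOURCE A (Python) =====
-- def pair_orders_with_ads(orders, ad_events):
--     # Initialize pointers for orders and ad_events
--     i, j = 0, 0
--     # Initialize the last ad event dictionary
--     last_ad_event = {}
--     # Initialize the result list
--     result = []
--     # Merge the lists and process events in chronological order
--     events = []
--     for order in orders:
--         events.append((order[0], 'order', order))
--     for ad_event in ad_events:
--         events.append((ad_event[0], 'ad_event', ad_event))
--     # Sort the merged list by timestamp
--     events.sort(key=lambda x: x[0])
--     # Process each event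
--     for _, event_type, event in events:
--         if event_type == 'ad_event':
--             timestamp, ad_event_id, customer_id = event
--             # Update the last ad event for the customer
--             last_ad_event[customer_id] = event
--         elif event_type == 'order':
--             timestamp, order_id, customer_id = event
--             # Get the last ad event for the customer
--             ad_event = last_ad_event.get(customer_id)
--             # Append the order and its corresponding ad event to the result
--             result.append((event, ad_event))
--     return result
-- ===== SOURCE B (Python) =====
-- def pair_orders_with_ads(orders, ad_events):
--     # For each order (in stable timestamp order), scan the ad events once,
--     # keeping the latest-seen ad event with a strictly earlier timestamp
--     # for that customer (>= so that among equal timestamps the later one wins).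
--     def last_prior(customer_id, ts):
--         best = None
--         for ad in ad_events:
--             if ad[2] == customer_id and ad[0] < ts and (best is None or best[0] <= ad[0]):
--                 best = ad
--         return best
--     return [(order, last_prior(order[2], order[0]))
--             for order in sorted(orders, key=lambda o: o[0])]
-- ===== Notes on version B (the rewrite author's own statement) =====
-- stated objective: simpler
-- what changed: Replaces A's tagged merge-sort of both streams plus a chronological sweep with a mutable last-ad dictionary by a direct query: stably sort the orders by timestamp and, for each order, a single running-best scan of ad_events keeps the last ad event of that customer with a strictly earlier timestamp.
import Mathlib
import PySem

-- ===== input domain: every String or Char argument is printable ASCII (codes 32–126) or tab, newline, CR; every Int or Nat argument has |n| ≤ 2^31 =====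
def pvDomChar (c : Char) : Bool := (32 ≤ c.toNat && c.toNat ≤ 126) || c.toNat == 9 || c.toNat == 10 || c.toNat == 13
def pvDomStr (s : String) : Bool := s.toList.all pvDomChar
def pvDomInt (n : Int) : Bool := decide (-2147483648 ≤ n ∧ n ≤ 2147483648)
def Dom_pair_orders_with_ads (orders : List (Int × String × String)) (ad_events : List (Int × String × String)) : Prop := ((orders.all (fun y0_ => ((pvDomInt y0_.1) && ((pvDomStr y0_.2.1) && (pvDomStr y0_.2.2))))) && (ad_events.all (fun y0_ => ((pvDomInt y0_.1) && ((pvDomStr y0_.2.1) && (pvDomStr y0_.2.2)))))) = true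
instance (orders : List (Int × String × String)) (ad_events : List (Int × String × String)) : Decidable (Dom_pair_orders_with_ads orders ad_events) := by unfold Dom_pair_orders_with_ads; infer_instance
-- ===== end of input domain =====

-- B replaces A's tagged merge-sort + chronological dict sweep by a per-order running-best
-- scan of ad_events over the stably timestamp-sorted orders (simpler; not claimed faster).

-- ===== PORT A =====
def pair_orders_with_ads (orders : List (Int × String × String)) (ad_events : List (Int × String × String)) : List ((Int × String × String) × (Option (Int × String × String))) :=
  -- events = []; for order in orders: events.append((order[0],'order',order)); same for ad_events
  let events1 := orders.foldl (fun ev order => ev ++ [(order.1, "order", order)]) []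
  let events := ad_events.foldl (fun ev ad_event => ev ++ [(ad_event.1, "ad_event", ad_event)]) events1
  -- events.sort(key=lambda x: x[0])
  let sortedEvents := PySem.List.sorted events (fun x => x.1)
  -- for _, event_type, event in events: ...  (last_ad_event dict + result list)
  let final := sortedEvents.foldl
    (fun (st : PySem.Dict String (Int × String × String) × List ((Int × String × String) × Option (Int × String × String))) e =>
      if e.2.1 == "ad_event" then (st.1.insert e.2.2.2.2 e.2.2, st.2)
      else if e.2.1 == "order" then (st.1, st.2 ++ [(e.2.2, st.1.get? e.2.2.2.2)])
      else st)
    (PySem.Dict.empty, [])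
  final.2

-- ===== PORT B =====
-- last_prior: one running-best scan of ad_events
def pyLastPrior (ad_events : List (Int × String × String)) (customer_id : String) (ts : Int) : Option (Int × String × String) :=
  ad_events.foldl
    (fun best ad =>
      if ad.2.2 == customer_id && decide (ad.1 < ts) &&
         (match best with | none => true | some b => decide (b.1 ≤ ad.1))
      then some ad else best) none

def pair_orders_with_ads_alt (orders : List (Int × String × String)) (ad_events : List (Int × String × String)) : List ((Int × String × String) × (Option (Int × String × String))) :=
  (PySem.List.sorted orders (fun o => o.1)).map
    (fun order => (order, pyLastPrior ad_events order.2.2 order.1))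

-- ===== PRECONDITION & SPEC =====
def Spec_pair_orders_with_ads (orders : List (Int × String × String)) (ad_events : List (Int × String × String)) (out : List ((Int × String × String) × (Option (Int × String × String)))) : Prop := out = pair_orders_with_ads_alt orders ad_events
instance (orders : List (Int × String × String)) (ad_events : List (Int × String × String)) (out : List ((Int × String × String) × (Option (Int × String × String)))) : Decidable (Spec_pair_orders_with_ads orders ad_events out) := by unfold Spec_pair_orders_with_ads; infer_instance

-- ===== CLAIM (what is proved, stated in full; the proofs are below) =====
def Claim_equal_pair_orders_with_ads : Prop := ∀ (orders : List (Int × String × String)) (ad_events : List (Int × String × String)), Dom_pair_orders_with_ads orders ad_events → Spec_pair_orders_with_ads orders ad_events (pair_orders_with_ads orders ad_events)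

-- ===== LEMMAS AND PROOFS =====

-- Functional abstraction of A's sweep: the dict is replaced by a lookup function.
def pvUpd (g : String → Option (Int × String × String)) (a : Int × String × String) : String → Option (Int × String × String) :=
  fun c => if c = a.2.2 then some a else g c

def pvRun (g : String → Option (Int × String × String)) : List (Int × String × (Int × String × String)) → List ((Int × String × String) × Option (Int × String × String))
  | [] => []
  | e :: S =>
    if e.2.1 == "ad_event" then pvRun (pvUpd g e.2.2) S
    else if e.2.1 == "order" then (e.2.2, g e.2.2.2.2) :: pvRun g S
    else pvRun g S

-- effect of one more ad event a on a query result
def pvStepVal (a : Int × String × String) (o : Int × String × String) (b : Option (Int × String × String)) : Option (Int × String × String) :=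
  if a.2.2 == o.2.2 && decide (a.1 < o.1) &&
     (match b with | none => true | some bb => decide (bb.1 ≤ a.1))
  then some a else b

def pvStepG (a : Int × String × String) (g : String → Option (Int × String × String)) : String → Option (Int × String × String) :=
  fun c => if a.2.2 == c && (match g c with | none => true | some bb => decide (bb.1 ≤ a.1)) then some a else g c

-- A's dict fold equals pvRun of the dict's lookup function
theorem pvFoldA_run (S : List (Int × String × (Int × String × String))) (d : PySem.Dict String (Int × String × String)) (r : List ((Int × String × String) × Option (Int × String × String))) :
    (S.foldl
      (fun (st : PySem.Dict String (Int × String × String) × List ((Int × String × String) × Option (Int × String × String))) e =>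
        if e.2.1 == "ad_event" then (st.1.insert e.2.2.2.2 e.2.2, st.2)
        else if e.2.1 == "order" then (st.1, st.2 ++ [(e.2.2, st.1.get? e.2.2.2.2)])
        else st)
      (d, r)).2 = r ++ pvRun (fun c => d.get? c) S := by
  induction S generalizing d r with
  | nil => simp [pvRun]
  | cons e S ih =>
    by_cases ha : e.2.1 == "ad_event"
    · simp only [List.foldl_cons, ha, if_pos, pvRun, ih]
      congr 2
      funext c
      simp [PySem.Dict.get?_insert, pvUpd]
    · by_cases ho : e.2.1 == "order"
      · simp only [List.foldl_cons, ha, ho, if_neg, if_pos, Bool.false_eq_true, not_false_iff, pvRun, ih]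
        simp
      · simp only [List.foldl_cons, ha, ho, if_neg, Bool.false_eq_true, not_false_iff, pvRun, ih]

theorem pvInsertBy_map_tag (x : Int × String × String) (l : List (Int × String × String)) (tag : String) :
    PySem.List.insertBy (fun a b => decide (a.1 < b.1)) (x.1, tag, x) (l.map (fun o => (o.1, tag, o)))
    = (PySem.List.insertBy (fun a b => decide (a.1 < b.1)) x l).map (fun o => (o.1, tag, o)) := by
  induction l with
  | nil => simp [PySem.List.insertBy]
  | cons y l ih =>
    by_cases h : x.1 < y.1
    · simp [PySem.List.insertBy, h]
    · simp [PySem.List.insertBy, h, ih]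

theorem pvSorted_map_tag (l : List (Int × String × String)) (tag : String) :
    PySem.List.sorted (l.map (fun o => (o.1, tag, o))) (fun x => x.1)
    = (PySem.List.sorted l (fun o => o.1)).map (fun o => (o.1, tag, o)) := by
  rw [PySem.List.sorted_eq_foldl_insertBy, PySem.List.sorted_eq_foldl_insertBy]
  rw [List.foldl_map]
  suffices h : ∀ (acc : List (Int × String × String)),
      l.foldl (fun acc x => PySem.List.insertBy (fun a b => decide (a.1 < b.1)) (x.1, tag, x) acc)
        (acc.map (fun o => (o.1, tag, o)))
      = (l.foldl (fun acc x => PySem.List.insertBy (fun a b => decide (a.1 < b.1)) x acc) acc).map (fun o => (o.1, tag, o)) by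
    simpa using h []
  induction l with
  | nil => intro acc; simp
  | cons x l ih =>
    intro acc
    simp only [List.foldl_cons, pvInsertBy_map_tag x acc tag]
    exact ih _

theorem pvRun_map_orders (g : String → Option (Int × String × String)) (l : List (Int × String × String)) :
    pvRun g (l.map (fun o => (o.1, "order", o))) = l.map (fun o => (o, g o.2.2)) := by
  induction l generalizing g with
  | nil => simp [pvRun]
  | cons o l ih => simp [pvRun, ih]

-- SUF: a suffix whose events all have timestamps strictly after a's sees a's update
-- exactly as pvStepVal on every emitted value
theorem pvRun_stepG (a : Int × String × String) :
    ∀ (S : List (Int × String × (Int × String × String))) (g₁ g₂ : String → Option (Int × String × String)),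
      (∀ e ∈ S, a.1 < e.1) → (∀ e ∈ S, e.2.2.1 = e.1) →
      (∀ c, g₁ c = pvStepG a g₂ c) →
      pvRun g₁ S = (pvRun g₂ S).map (fun p => (p.1, pvStepVal a p.1 p.2)) := by
  intro S
  induction S with
  | nil => intro g₁ g₂ _ _ _; simp [pvRun]
  | cons e S ih =>
    intro g₁ g₂ hts hwf hg
    by_cases hAd : e.2.1 == "ad_event"
    · simp only [pvRun, hAd, if_pos]
      apply ih
      · intro x hx; exact hts x (List.mem_cons_of_mem _ hx)
      · intro x hx; exact hwf x (List.mem_cons_of_mem _ hx)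
      · intro c
        by_cases hc : c = e.2.2.2.2
        · have h1 : a.1 < e.2.2.1 := by
            rw [hwf e (List.mem_cons_self)]
            exact hts e (List.mem_cons_self)
          simp [pvUpd, pvStepG, hc, not_le.mpr h1]
        · simp only [pvUpd, pvStepG, if_neg hc]
          rw [hg c]
          simp [pvStepG]
    · by_cases hOrd : e.2.1 == "order"
      · simp only [pvRun, hAd, hOrd, Bool.false_eq_true, if_neg, if_pos, not_false_iff]
        rw [List.map_cons]
        congr 1
        · have h1 : a.1 < e.2.2.1 := by
            rw [hwf e (List.mem_cons_self)]
            exact hts e (List.mem_cons_self)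
          rw [hg e.2.2.2.2]
          simp [pvStepG, pvStepVal, h1]
        · apply ih
          · intro x hx; exact hts x (List.mem_cons_of_mem _ hx)
          · intro x hx; exact hwf x (List.mem_cons_of_mem _ hx)
          · exact hg
      · simp only [pvRun, hAd, hOrd, Bool.false_eq_true, if_neg, not_false_iff]
        apply ih
        · intro x hx; exact hts x (List.mem_cons_of_mem _ hx)
        · intro x hx; exact hwf x (List.mem_cons_of_mem _ hx)
        · exact hg

-- INSAD: inserting one more (latest-appended) ad event into the sorted stream acts as
-- pvStepVal on every emitted value
theorem pvRun_insertBy (a : Int × String × String) :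
    ∀ (S : List (Int × String × (Int × String × String))) (g : String → Option (Int × String × String)),
      S.Pairwise (fun x y => x.1 ≤ y.1) → (∀ e ∈ S, e.2.2.1 = e.1) →
      (∀ c b, g c = some b → b.1 ≤ a.1) →
      pvRun g (PySem.List.insertBy (fun x y => decide (x.1 < y.1)) (a.1, "ad_event", a) S)
      = (pvRun g S).map (fun p => (p.1, pvStepVal a p.1 p.2)) := by
  intro S
  induction S with
  | nil => intro g _ _ _; simp [PySem.List.insertBy, pvRun]
  | cons e S ih =>
    intro g hpw hwf hg
    by_cases hlt : a.1 < e.1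
    · have hins : PySem.List.insertBy (fun x y => decide (x.1 < y.1)) (a.1, "ad_event", a) (e :: S)
          = (a.1, "ad_event", a) :: e :: S := by
        simp [PySem.List.insertBy, hlt]
      rw [hins]
      have : pvRun g ((a.1, "ad_event", a) :: e :: S) = pvRun (pvUpd g a) (e :: S) := by
        simp [pvRun]
      rw [this]
      apply pvRun_stepG
      · intro x hx
        rcases List.mem_cons.mp hx with h | h
        · rw [h]; exact hlt
        · exact lt_of_lt_of_le hlt ((List.pairwise_cons.mp hpw).1 x h)
      · exact hwf
      · intro c
        by_cases hc : c = a.2.2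
        · simp only [pvUpd, pvStepG, hc]
          cases hgc : g a.2.2 with
          | none => simp
          | some b => simp [hg _ _ hgc]
        · simp only [pvUpd, if_neg hc, pvStepG]
          have : (a.2.2 == c) = false := by
            simp [Ne.symm hc]
          simp [this]
    · have hins : PySem.List.insertBy (fun x y => decide (x.1 < y.1)) (a.1, "ad_event", a) (e :: S)
          = e :: PySem.List.insertBy (fun x y => decide (x.1 < y.1)) (a.1, "ad_event", a) S := by
        simp [PySem.List.insertBy, hlt]
      rw [hins]
      by_cases hAd : e.2.1 == "ad_event"
      · simp only [pvRun, hAd, if_pos]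
        apply ih
        · exact (List.pairwise_cons.mp hpw).2
        · intro x hx; exact hwf x (List.mem_cons_of_mem _ hx)
        · intro c b hb
          by_cases hc : c = e.2.2.2.2
          · have : b = e.2.2 := by
              have h2 := hb
              simp [pvUpd, hc] at h2
              exact h2.symm
            rw [this, hwf e (List.mem_cons_self)]
            exact not_lt.mp hlt
          · exact hg c b (by simpa [pvUpd, hc] using hb)
      · by_cases hOrd : e.2.1 == "order"
        · simp only [pvRun, hAd, hOrd, Bool.false_eq_true, if_neg, if_pos, not_false_iff]
          rw [List.map_cons]
          congr 1
          · have h1 : ¬ (a.1 < e.2.2.1) := by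
              rw [hwf e (List.mem_cons_self)]; exact hlt
            simp [pvStepVal, h1]
          · apply ih
            · exact (List.pairwise_cons.mp hpw).2
            · intro x hx; exact hwf x (List.mem_cons_of_mem _ hx)
            · exact hg
        · simp only [pvRun, hAd, hOrd, Bool.false_eq_true, if_neg, not_false_iff]
          apply ih
          · exact (List.pairwise_cons.mp hpw).2
          · intro x hx; exact hwf x (List.mem_cons_of_mem _ hx)
          · exact hg

-- MAIN: the sorted sweep from the empty lookup equals B's per-order query
theorem pvMain (orders : List (Int × String × String)) :
    ∀ (ads : List (Int × String × String)),
      pvRun (fun _ => none)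
        (PySem.List.sorted (orders.map (fun o => (o.1, "order", o)) ++ ads.map (fun a => (a.1, "ad_event", a))) (fun x => x.1))
      = (PySem.List.sorted orders (fun o => o.1)).map (fun o => (o, pyLastPrior ads o.2.2 o.1)) := by
  intro ads
  induction ads using List.reverseRecOn with
  | nil =>
    simp only [List.map_nil, List.append_nil]
    rw [pvSorted_map_tag, pvRun_map_orders]
    simp [pyLastPrior]
  | append_singleton l a ih =>
    have hA : orders.map (fun o => (o.1, "order", o)) ++ (l ++ [a]).map (fun a => (a.1, "ad_event", a))
        = (orders.map (fun o => (o.1, "order", o)) ++ l.map (fun a => (a.1, "ad_event", a))) ++ [(a.1, "ad_event", a)] := by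
      simp
    rw [hA]
    rw [PySem.List.sorted_eq_foldl_insertBy, List.foldl_append, ← PySem.List.sorted_eq_foldl_insertBy]
    simp only [List.foldl_cons, List.foldl_nil]
    rw [pvRun_insertBy a _ _ (PySem.List.sorted_pairwise _ _) ?wf (by intro c b h; cases h)]
    case wf =>
      intro e he
      have := (PySem.List.mem_sorted _ _ _ _).mp he
      rcases List.mem_append.mp this with h | h
      · rcases List.mem_map.mp h with ⟨o, _, rfl⟩; rfl
      · rcases List.mem_map.mp h with ⟨x, _, rfl⟩; rfl
    rw [ih, List.map_map]
    apply List.map_congr_left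
    intro o _
    simp only [Function.comp]
    congr 1
    simp [pyLastPrior, pvStepVal, List.foldl_append]

-- ===== VERDICT (by name: the statement is the Claim_ definition above) =====
theorem pair_orders_with_ads_spec : Claim_equal_pair_orders_with_ads := by
  intro orders ad_events _
  unfold Spec_pair_orders_with_ads pair_orders_with_ads pair_orders_with_ads_alt
  simp only [PySem.List.foldl_append_singleton_eq_map, List.nil_append]
  rw [pvFoldA_run]
  have hempty : (fun c => (PySem.Dict.empty : PySem.Dict String (Int × String × String)).get? c)
      = (fun _ => (none : Option (Int × String × String))) := by
    funext c; exact PySem.Dict.get?_empty c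
  rw [List.nil_append, hempty, pvMain]
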